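-- pv_equiv track=rewrite | github.com/DanielHara/leetcode-solutions | 2359.py | getDistancesFromNode
-- ===== SOURCE A (Python) =====
-- from typing import List
--
-- def getDistancesFromNode(edges: List[int], start: int):
--     result_array = [-1 for i in range(len(edges))]
--
--     border = [start]
--
--     distance = 0
--     visited = set()
--     while border:
--         new_border = []
--
--         while border:
--             node = border.pop()
--             if node in visited:
--                 continue
--
--             visited.add(node)
--
--             result_array[node] = distance
--
--             if edges[node] != -1:
--                 new_border.append(edges[node])
--
--         border = new_border
--         distance = distance + 1
--
--     return result_array
-- ===== SOURCE B (Python) =====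
-- from typing import List
--
-- def getDistancesFromNode(edges: List[int], start: int):
--     result = [-1] * len(edges)
--     node = start
--     distance = 0
--     visited = set()
--     while node not in visited:
--         visited.add(node)
--         result[node] = distance
--         distance += 1
--         nxt = edges[node]
--         if nxt == -1:
--             break
--         node = nxt
--     return result
-- ===== Notes on version B (the rewrite author's own statement) =====
-- stated objective: simpler
-- what changed: Replaces the nested while loops over border/new_border frontier lists and the pop/append machinery with a single while loop threading one node variable (the frontier always holds at most one node).
import Mathlib
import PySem

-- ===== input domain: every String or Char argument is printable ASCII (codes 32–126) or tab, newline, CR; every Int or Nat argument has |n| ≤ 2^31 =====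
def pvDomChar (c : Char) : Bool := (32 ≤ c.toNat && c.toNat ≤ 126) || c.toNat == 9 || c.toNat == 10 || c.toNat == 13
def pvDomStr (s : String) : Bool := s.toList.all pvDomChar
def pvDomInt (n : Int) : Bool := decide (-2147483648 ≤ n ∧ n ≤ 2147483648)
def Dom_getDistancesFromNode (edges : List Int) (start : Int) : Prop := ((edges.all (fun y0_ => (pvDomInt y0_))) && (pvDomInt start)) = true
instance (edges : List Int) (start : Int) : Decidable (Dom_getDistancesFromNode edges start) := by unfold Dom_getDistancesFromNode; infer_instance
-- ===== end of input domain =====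

-- B replaces A's two nested while loops over border/new_border frontier lists with a
-- single loop threading one node variable (objective: simpler). Both traverse the same chain.

-- ===== PORT A =====
-- inner 'while border': pop from the end, skip visited, write distance, push edges[node]
-- into new_border; the 'none' branches of pySet?/pyGet? are where Python raises IndexError
-- (excluded by Pre_ below).
def pvInnerA (edges : List Int) (distance : Int) (border newBorder : List Int)
    (visited : PySem.Set Int) (result : List Int) : List Int × PySem.Set Int × List Int :=
  match h : border.getLast? with
  | none => (newBorder, visited, result)
  | some node =>
    if visited.contains node then
      pvInnerA edges distance border.dropLast newBorder visited result
    else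
      let visited' := visited.add node
      match PySem.List.pySet? result node distance with
      | none => (newBorder, visited', result)      -- IndexError in Python (outside Pre_)
      | some result' =>
        match PySem.List.pyGet? edges node with
        | none => (newBorder, visited', result')   -- IndexError in Python (outside Pre_)
        | some e =>
          pvInnerA edges distance border.dropLast
            (if e ≠ -1 then newBorder ++ [e] else newBorder) visited' result'
termination_by border.length
decreasing_by
  all_goals
    cases border with
    | nil => simp at h
    | cons a l => simp [List.length_dropLast]

-- outer 'while border': fuel makes the recursion total (it never runs out inside Pre_).
def pvOuterA (edges : List Int) (fuel : Nat) (border : List Int) (distance : Int)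
    (visited : PySem.Set Int) (result : List Int) : List Int :=
  if border.isEmpty then result
  else
    match fuel with
    | 0 => result
    | fuel + 1 =>
      match pvInnerA edges distance border [] visited result with
      | (nb, v, r) => pvOuterA edges fuel nb (distance + 1) v r

def getDistancesFromNode (edges : List Int) (start : Int) : List Int :=
  pvOuterA edges (2 * edges.length + 2) [start] 0 PySem.Set.empty
    (List.replicate edges.length (-1))

-- ===== PORT B =====
-- single 'while node not in visited' loop of Source B; fuel only for totality.
def pvWalkB (edges : List Int) (fuel : Nat) (node : Int) (distance : Int)
    (visited : PySem.Set Int) (result : List Int) : List Int :=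
  match fuel with
  | 0 => result
  | fuel + 1 =>
    if visited.contains node then result
    else
      let visited' := visited.add node
      match PySem.List.pySet? result node distance with
      | none => result      -- IndexError in Python (outside Pre_)
      | some result' =>
        match PySem.List.pyGet? edges node with
        | none => result'   -- IndexError in Python (outside Pre_)
        | some nxt => if nxt = -1 then result' else pvWalkB edges fuel nxt (distance + 1) visited' result'

def getDistancesFromNode_alt (edges : List Int) (start : Int) : List Int :=
  pvWalkB edges (2 * edges.length + 2) start 0 PySem.Set.empty
    (List.replicate edges.length (-1))

-- ===== PRECONDITION & SPEC =====
-- pvOkWalk follows the edges-successor chain from `node` (nothing else: no result array,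
-- no distances), answering whether every index the chain reaches is in range; the fuel
-- 2*len+2 exceeds the number of distinct in-range indices (2*len, negatives included),
-- so it never truncates a safe walk.
def pvOkWalk (edges : List Int) (fuel : Nat) (node : Int) (visited : PySem.Set Int) : Bool :=
  match fuel with
  | 0 => false
  | fuel + 1 =>
    if visited.contains node then true
    else
      match PySem.List.pyGet? edges node with
      | none => false
      | some e => if e = -1 then true else pvOkWalk edges fuel e (visited.add node)

-- Pre_ holds exactly when the walk from start stays in range; outside it Python A
-- (and B alike) raises IndexError, so only raising inputs are excluded.
def Pre_getDistancesFromNode (edges : List Int) (start : Int) : Prop :=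
  pvOkWalk edges (2 * edges.length + 2) start PySem.Set.empty = true
instance (edges : List Int) (start : Int) : Decidable (Pre_getDistancesFromNode edges start) := by
  unfold Pre_getDistancesFromNode; infer_instance

def pvWitness_getDistancesFromNode : List Int × Int := ([1, -1], 0)

def Spec_getDistancesFromNode (edges : List Int) (start : Int) (out : List Int) : Prop := out = getDistancesFromNode_alt edges start
instance (edges : List Int) (start : Int) (out : List Int) : Decidable (Spec_getDistancesFromNode edges start out) := by unfold Spec_getDistancesFromNode; infer_instance

-- ===== CLAIM (what is proved, stated in full; the proofs are below) =====
def Claim_equal_getDistancesFromNode : Prop := ∀ (edges : List Int) (start : Int), Dom_getDistancesFromNode edges start → Pre_getDistancesFromNode edges start → Spec_getDistancesFromNode edges start (getDistancesFromNode edges start)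

-- ===== LEMMAS AND PROOFS =====

theorem pvOuterA_nil (edges : List Int) (fuel : Nat) (distance : Int)
    (visited : PySem.Set Int) (result : List Int) :
    pvOuterA edges fuel [] distance visited result = result := by
  cases fuel <;> simp [pvOuterA]

theorem pvOuterA_cons (edges : List Int) (fuel : Nat) (a : Int) (l : List Int)
    (distance : Int) (visited : PySem.Set Int) (result : List Int) :
    pvOuterA edges (fuel + 1) (a :: l) distance visited result =
      match pvInnerA edges distance (a :: l) [] visited result with
      | (nb, v, r) => pvOuterA edges fuel nb (distance + 1) v r := by
  rw [pvOuterA]; rfl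

theorem pvInnerA_nil (edges : List Int) (distance : Int) (newBorder : List Int)
    (visited : PySem.Set Int) (result : List Int) :
    pvInnerA edges distance [] newBorder visited result = (newBorder, visited, result) := by
  simp [pvInnerA]

-- one pass of A's inner loop over a singleton frontier
theorem pvInnerA_singleton (edges : List Int) (distance node : Int) (newBorder : List Int)
    (visited : PySem.Set Int) (result : List Int) :
    pvInnerA edges distance [node] newBorder visited result =
      if visited.contains node then (newBorder, visited, result)
      else
        match PySem.List.pySet? result node distance with
        | none => (newBorder, visited.add node, result)
        | some result' =>
          match PySem.List.pyGet? edges node with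
          | none => (newBorder, visited.add node, result')
          | some e => (if e ≠ -1 then newBorder ++ [e] else newBorder, visited.add node, result') := by
  rw [pvInnerA]
  simp only [List.getLast?_singleton, List.dropLast_singleton]
  split_ifs with hv
  · rw [pvInnerA_nil]
  · cases hs : PySem.List.pySet? result node distance with
    | none => rfl
    | some result' =>
      cases hg : PySem.List.pyGet? edges node with
      | none => rfl
      | some e => simp [pvInnerA_nil]

-- A's frontier always holds at most one node; on a singleton frontier the nested loops
-- advance exactly one step of B's walk.  The hypothesis pvOkWalk = true (same fuel)
-- supplies the in-range facts at every step of the chain.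
theorem pvOuter_eq_walk (edges : List Int) :
    ∀ (fuel : Nat) (node distance : Int) (visited : PySem.Set Int) (result : List Int),
      pvOkWalk edges fuel node visited = true → result.length = edges.length →
      pvOuterA edges fuel [node] distance visited result
        = pvWalkB edges fuel node distance visited result := by
  intro fuel
  induction fuel with
  | zero =>
    intro node distance visited result hok _
    simp [pvOkWalk] at hok
  | succ fuel ih =>
    intro node distance visited result hok hlen
    rw [pvOuterA_cons, pvInnerA_singleton, pvWalkB]
    rw [pvOkWalk] at hok
    by_cases hv : node ∈ visited
    · have hc : visited.contains node = true := by
        simp [PySem.Set.contains, List.contains_eq_mem, hv]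
      simp [hv, pvOuterA_nil]
    · have hc : visited.contains node = false := by
        simp [PySem.Set.contains, List.contains_eq_mem, hv]
      simp only [hc, Bool.false_eq_true, if_false] at hok
      cases hg : PySem.List.pyGet? edges node with
      | none => rw [hg] at hok; simp at hok
      | some e =>
        rw [hg] at hok
        have hrange : PySem.Raise.InRange edges.length node := by
          by_contra hcn
          rw [(PySem.List.pyGet?_eq_none_iff edges node).mpr hcn] at hg
          simp at hg
        have hset : PySem.List.pySet? result node distance ≠ none := fun hn =>
          ((PySem.List.pySet?_eq_none_iff result node distance).mp hn) (hlen ▸ hrange)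
        obtain ⟨result', hres⟩ := Option.ne_none_iff_exists'.mp hset
        have hlen' : result'.length = edges.length := by
          have hD : PySem.List.pySetD result node distance = result' := by
            unfold PySem.List.pySetD; rw [hres]; rfl
          rw [← hD, PySem.List.length_pySetD, hlen]
        by_cases hme : e = -1
        · rw [hres] at *; simp [hv, hme, pvOuterA_nil]
        · simp only [hme, if_false] at hok
          simp only [hc, hres, ne_eq, hme, not_false_eq_true, if_true, Bool.false_eq_true, if_false, List.nil_append]
          exact ih e (distance + 1) (visited.add node) result' hok hlen'

-- ===== VERDICT (by name: the statement is the Claim_ definition above) =====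
theorem getDistancesFromNode_spec : Claim_equal_getDistancesFromNode := by
  intro edges start _ hpre
  unfold Spec_getDistancesFromNode getDistancesFromNode getDistancesFromNode_alt
  exact pvOuter_eq_walk edges _ start 0 PySem.Set.empty _ hpre
    (List.length_replicate)
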